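-- pv_equiv track=rewrite | github.com/vlad-a-c/PlayPalace11 | clients/desktop/ui/config_sharing.py | match_servers
-- ===== SOURCE A (Python) =====
-- def match_servers(imported_servers: list, existing_servers: dict) -> dict:
--     """Map imported server index to existing server_id by matching host.
--
--     Args:
--         imported_servers: List of imported server dicts.
--         existing_servers: Dict mapping server_id to server dict (from config manager).
--
--     Returns:
--         Dict mapping imported list index to existing server_id, or None if new.
--     """
--     # Build lookup: lowercase host -> server_id
--     host_to_id = {}
--     for server_id, server in existing_servers.items():
--         host_lower = server.get("host", "").lower()
--         if host_lower:
--             host_to_id[host_lower] = server_id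
--
--     result = {}
--     for i, imp_server in enumerate(imported_servers):
--         imp_host = imp_server.get("host", "").lower()
--         result[i] = host_to_id.get(imp_host)
--     return result
-- ===== SOURCE B (Python) =====
-- def match_servers(imported_servers: list, existing_servers: dict) -> dict:
--     """Map imported server index to existing server_id by matching host."""
--     items = list(existing_servers.items())
--
--     def find_id(host):
--         # latest existing server wins, so search back-to-front and stop at first hit
--         for server_id, server in reversed(items):
--             if server.get("host", "").lower() == host:
--                 return server_id
--         return None
--
--     result = {}
--     for i, imp_server in enumerate(imported_servers):
--         h = imp_server.get("host", "").lower()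
--         result[i] = find_id(h) if h else None
--     return result
-- ===== Notes on version B (the rewrite author's own statement) =====
-- stated objective: alternative
-- what changed: B drops A's host->id lookup dict entirely: for each imported server it does a direct back-to-front linear search of the existing servers, returning the first (i.e. latest) host match, which reproduces A's last-existing-wins overwrite semantics.
import Mathlib
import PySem

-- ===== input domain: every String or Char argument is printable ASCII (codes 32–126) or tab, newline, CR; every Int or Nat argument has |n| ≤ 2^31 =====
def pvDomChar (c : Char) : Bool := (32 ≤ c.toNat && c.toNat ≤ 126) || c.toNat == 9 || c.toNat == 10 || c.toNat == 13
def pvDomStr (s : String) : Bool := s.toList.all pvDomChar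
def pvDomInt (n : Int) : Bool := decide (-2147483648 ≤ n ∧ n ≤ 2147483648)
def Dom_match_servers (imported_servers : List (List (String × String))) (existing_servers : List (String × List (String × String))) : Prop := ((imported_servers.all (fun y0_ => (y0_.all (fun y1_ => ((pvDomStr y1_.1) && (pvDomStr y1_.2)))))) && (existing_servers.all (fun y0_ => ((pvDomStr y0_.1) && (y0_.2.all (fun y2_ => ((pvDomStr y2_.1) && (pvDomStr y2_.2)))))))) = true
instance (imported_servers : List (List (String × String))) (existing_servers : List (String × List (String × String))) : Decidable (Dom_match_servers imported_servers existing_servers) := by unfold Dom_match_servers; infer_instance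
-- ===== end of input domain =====

-- B replaces A's host->id lookup dict by a direct back-to-front linear search of the
-- existing servers per imported server (alternative decomposition, not faster).

-- shared helper: server.get("host", "").lower()
def lowHost (sv : List (String × String)) : String :=
  PySem.Str.lower (PySem.Dict.getD (PySem.Dict.mk sv) "host" "")

-- ===== PORT A =====
def match_servers (imported_servers : List (List (String × String))) (existing_servers : List (String × List (String × String))) : List (Int × Option String) :=
  let host_to_id : PySem.Dict String String :=
    existing_servers.foldl (fun d p =>
      let host_lower := lowHost p.2
      if host_lower ≠ "" then d.insert host_lower p.1 else d) PySem.Dict.empty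
  let result : PySem.Dict Int (Option String) :=
    (PySem.List.enumerate imported_servers).foldl (fun r p =>
      r.insert p.1 (host_to_id.get? (lowHost p.2))) PySem.Dict.empty
  result.items

-- ===== PORT B =====
-- B's find_id loop over reversed(items): first hit from the back, else None
def findId (h : String) : List (String × List (String × String)) → Option String
  | [] => none
  | p :: rest => if lowHost p.2 = h then some p.1 else findId h rest

def match_servers_alt (imported_servers : List (List (String × String))) (existing_servers : List (String × List (String × String))) : List (Int × Option String) :=
  (PySem.List.enumerate imported_servers).map (fun p =>
    (p.1, let h := lowHost p.2
          if h = "" then none else findId h existing_servers.reverse))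

-- ===== PRECONDITION & SPEC =====
def Spec_match_servers (imported_servers : List (List (String × String))) (existing_servers : List (String × List (String × String))) (out : List (Int × Option String)) : Prop := out = match_servers_alt imported_servers existing_servers
instance (imported_servers : List (List (String × String))) (existing_servers : List (String × List (String × String))) (out : List (Int × Option String)) : Decidable (Spec_match_servers imported_servers existing_servers out) := by unfold Spec_match_servers; infer_instance

-- ===== CLAIM (what is proved, stated in full; the proofs are below) =====
def Claim_equal_match_servers : Prop := ∀ (imported_servers : List (List (String × String))) (existing_servers : List (String × List (String × String))), Dom_match_servers imported_servers existing_servers → Spec_match_servers imported_servers existing_servers (match_servers imported_servers existing_servers)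

-- ===== LEMMAS AND PROOFS =====

theorem findId_append (h : String) (l l' : List (String × List (String × String))) :
    findId h (l ++ l') = (findId h l).or (findId h l') := by
  induction l with
  | nil => simp [findId]
  | cons p rest ih => by_cases hc : lowHost p.2 = h <;> simp [findId, hc, ih]

-- lookup in A's host_to_id: the LAST existing server with this (nonempty) lowered host wins
theorem get?_hostFold (es : List (String × List (String × String)))
    (d : PySem.Dict String String) (h : String) (hh : h ≠ "") :
    (es.foldl (fun d p =>
        if lowHost p.2 = "" then d else d.insert (lowHost p.2) p.1) d).get? h
      = (findId h es.reverse).or (d.get? h) := by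
  induction es generalizing d with
  | nil => simp [findId]
  | cons p rest ih =>
    simp only [List.foldl_cons, List.reverse_cons, findId_append, ih]
    cases hr : findId h rest.reverse with
    | some s => simp [Option.or]
    | none =>
      by_cases hc : lowHost p.2 = h
      · simp [Option.or, findId, hc, PySem.Dict.get?_insert_self, hh]
      · by_cases he : lowHost p.2 = ""
        · simp [Option.or, findId, he, Ne.symm hh]
        · simp [Option.or, findId, hc, he, PySem.Dict.get?_insert_of_ne _ _ (Ne.symm hc)]

-- A's host_to_id never holds the empty-host key
theorem get?_hostFold_empty (es : List (String × List (String × String)))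
    (d : PySem.Dict String String) (hd : d.get? "" = none) :
    (es.foldl (fun d p =>
        if lowHost p.2 = "" then d else d.insert (lowHost p.2) p.1) d).get? "" = none := by
  induction es generalizing d with
  | nil => exact hd
  | cons p rest ih =>
    simp only [List.foldl_cons]
    apply ih
    by_cases he : lowHost p.2 = ""
    · simpa [he] using hd
    · simpa [he, PySem.Dict.get?_insert_of_ne _ _ (fun h => he h.symm)] using hd

-- ===== VERDICT (by name: the statement is the Claim_ definition above) =====
theorem match_servers_spec : Claim_equal_match_servers := by
  intro imps es _
  simp only [Spec_match_servers, match_servers, match_servers_alt]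
  have hitems := PySem.Dict.items_foldl_insert_fresh
      (PySem.List.enumerate imps)
      (fun p => p.1)
      (fun p => (es.foldl (fun d p =>
        if lowHost p.2 ≠ "" then d.insert (lowHost p.2) p.1 else d) PySem.Dict.empty).get? (lowHost p.2))
      PySem.Dict.empty
      (fun a _ => PySem.Dict.contains_empty (ν := Option String) a.1)
      (by
        have := PySem.List.pairwise_lt_enumerate imps 0
        exact List.pairwise_map.mpr (this.imp (fun hlt => Int.ne_of_lt hlt)))
  simp only [hitems]
  rw [show (PySem.Dict.empty : PySem.Dict Int (Option String)).items = [] from rfl, List.nil_append]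
  apply List.map_congr_left
  intro p _
  by_cases he : lowHost p.2 = ""
  · simp [he, get?_hostFold_empty es PySem.Dict.empty (PySem.Dict.get?_empty "")]
  · simp [he, get?_hostFold es PySem.Dict.empty _ he]
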